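-- pv_equiv track=rewrite | github.com/itsecd/isb-2026 | lab_2/task2/task2.py | vector_summ
-- ===== SOURCE A (Python) =====
-- from typing import List
--
-- def vector_summ(numbers: List[int]) -> int:
--     """Функция для вычисления суммы последовательности
--     нули интерпретируются как -1, единицы как +1
--     на вход принимает список битов
--     возвращает сумму преобразованной последовательности
--     """
--     summ: int = 0
--
--     for n in numbers:
--         if n == 0:
--             summ -= 1
--         else:
--             summ += 1
--
--     return summ
-- ===== SOURCE B (Python) =====
-- from typing import List
--
-- def vector_summ(numbers: List[int]) -> int:
--     # Divide and conquer: split the list in half, sum the two halves' results.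
--     if not numbers:
--         return 0
--     if len(numbers) == 1:
--         return -1 if numbers[0] == 0 else 1
--     mid = len(numbers) // 2
--     return vector_summ(numbers[:mid]) + vector_summ(numbers[mid:])
-- ===== Notes on version B (the rewrite author's own statement) =====
-- stated objective: alternative
-- what changed: Replaces A's single-pass +/-1 accumulator loop with a divide-and-conquer recursion: split the list at the midpoint, recurse on each half, add the two partial sums (correct because the transformed sum is associative).
import Mathlib
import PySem

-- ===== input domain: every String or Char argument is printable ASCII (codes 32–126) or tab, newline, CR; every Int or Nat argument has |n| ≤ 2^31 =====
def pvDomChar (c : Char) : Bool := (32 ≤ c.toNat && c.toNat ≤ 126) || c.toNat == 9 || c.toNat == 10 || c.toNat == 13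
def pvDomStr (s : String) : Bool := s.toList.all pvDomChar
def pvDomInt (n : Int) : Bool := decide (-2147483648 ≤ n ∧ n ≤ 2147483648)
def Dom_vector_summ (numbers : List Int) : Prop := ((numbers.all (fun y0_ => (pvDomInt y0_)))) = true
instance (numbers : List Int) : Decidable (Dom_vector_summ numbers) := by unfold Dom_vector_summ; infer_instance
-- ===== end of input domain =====

-- B replaces A's single-pass ±1 accumulator with a divide-and-conquer recursion on half-lists (objective: alternative).

-- ===== PORT A =====
-- literal transliteration: accumulator summ, branch on n == 0
def vector_summ (numbers : List Int) : Int :=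
  numbers.foldl (fun summ n => if n == 0 then summ - 1 else summ + 1) 0

-- ===== PORT B =====
-- literal transliteration of Source B: empty → 0, singleton → ±1 (numbers[0] is the single
-- element), else recurse on numbers[:mid] and numbers[mid:]; since 0 ≤ mid ≤ len the
-- Python slices are exactly take/drop (PySem.List.slice_to_natCast / slice_from_natCast).
def vector_summ_alt (numbers : List Int) : Int :=
  match numbers with
  | [] => 0
  | [x] => if x == 0 then -1 else 1
  | x :: y :: rest =>
    let l := x :: y :: rest
    let mid := l.length / 2
    vector_summ_alt (l.take mid) + vector_summ_alt (l.drop mid)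
termination_by numbers.length
decreasing_by
  · simp [List.length_take]; omega
  · simp; omega

-- ===== PRECONDITION & SPEC =====
def Spec_vector_summ (numbers : List Int) (out : Int) : Prop := out = vector_summ_alt numbers
instance (numbers : List Int) (out : Int) : Decidable (Spec_vector_summ numbers out) := by unfold Spec_vector_summ; infer_instance

-- ===== CLAIM (what is proved, stated in full; the proofs are below) =====
def Claim_equal_vector_summ : Prop := ∀ (numbers : List Int), Dom_vector_summ numbers → Spec_vector_summ numbers (vector_summ numbers)

-- ===== LEMMAS AND PROOFS =====
-- the common specification: sum of the element-wise ±1 map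
def pvSgnSum (l : List Int) : Int := (l.map (fun n => if n == 0 then (-1 : Int) else 1)).sum

theorem vector_summ_foldl_shift (numbers : List Int) (a : Int) :
    numbers.foldl (fun summ n => if n == 0 then summ - 1 else summ + 1) a
      = a + pvSgnSum numbers := by
  induction numbers generalizing a with
  | nil => simp [pvSgnSum]
  | cons x xs ih =>
    simp only [List.foldl_cons, ih, pvSgnSum, List.map_cons, List.sum_cons]
    split <;> ring

theorem pvSgnSum_append (l₁ l₂ : List Int) :
    pvSgnSum (l₁ ++ l₂) = pvSgnSum l₁ + pvSgnSum l₂ := by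
  simp [pvSgnSum]

theorem vector_summ_alt_eq_sgnSum (numbers : List Int) :
    vector_summ_alt numbers = pvSgnSum numbers := by
  induction hn : numbers.length using Nat.strong_induction_on generalizing numbers with
  | _ n ih =>
    match numbers with
    | [] => simp [vector_summ_alt, pvSgnSum]
    | [x] => simp [vector_summ_alt, pvSgnSum]
    | x :: y :: rest =>
      rw [vector_summ_alt]
      have hlen : (x :: y :: rest).length = n := hn
      have h1 : ((x :: y :: rest).take ((x :: y :: rest).length / 2)).length < n := by
        simp [List.length_take] at *; omega
      have h2 : ((x :: y :: rest).drop ((x :: y :: rest).length / 2)).length < n := by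
        simp at *; omega
      rw [ih _ h1 _ rfl, ih _ h2 _ rfl, ← pvSgnSum_append, List.take_append_drop]

-- ===== VERDICT (by name: the statement is the Claim_ definition above) =====
theorem vector_summ_spec : Claim_equal_vector_summ := by
  intro numbers _
  unfold Spec_vector_summ vector_summ
  rw [vector_summ_foldl_shift, vector_summ_alt_eq_sgnSum]
  ring
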